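-- pv_equiv track=rewrite | github.com/caltech-quantum-topology/fk-alpha | classification.py | is_quasipositive_braid
-- ===== SOURCE A (Python) =====
-- def is_positive_braid(braid):
--     """
--     Check if a braid is positive (contains only positive generators).
--
--     A positive braid uses only positive generators σ_i, with no inverses σ_i^{-1}.
--     Positive braids have special properties in knot theory and are easier to analyze.
--
--     Args:
--         braid (list): List of integers representing braid generators
--
--     Returns:
--         bool: True if all generators are positive, False otherwise
--
--     Examples:
--         >>> is_positive_braid([1, 2, 3, 1])
--         True
--         >>> is_positive_braid([1, -2, 3])
--         False
--         >>> is_positive_braid([])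
--         True
--     """
--     for x in braid:
--         if x < 0:
--             return False
--     return True
--
-- def is_quasipositive_braid(braid):
--     """
--     Check if a braid is quasipositive.
--
--     A braid is quasipositive if it can be written as a product of conjugates
--     of positive generators. This is equivalent to checking if the braid can
--     be expressed using only positive generators and their conjugates by
--     positive braids.
--
--     This implementation uses a simplified heuristic: a braid is likely
--     quasipositive if every negative generator can be "cancelled" by
--     surrounding positive generators through conjugation.
--
--     Args:
--         braid (list): List of integers representing braid generators
--
--     Returns:
--         bool: True if braid appears to be quasipositive
--
--     Examples:
--         >>> is_quasipositive_braid([1, 2, 1])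
--         True
--         >>> is_quasipositive_braid([1, -2, 1])  # σ₁σ₂⁻¹σ₁ = σ₁σ₂⁻¹σ₁
--         True
--         >>> is_quasipositive_braid([-1, -2, -3])
--         False
--
--     Note:
--         This is a heuristic implementation. The full quasipositive test
--         requires complex algorithms involving braid conjugation and
--         may not detect all quasipositive braids.
--     """
--     if is_positive_braid(braid):
--         return True
--
--     # Heuristic: check if negative generators appear in "conjugating" positions
--     # A more sophisticated algorithm would need to actually attempt conjugation
--
--     from collections import defaultdict
--
--     # Track positions of each generator
--     positions = defaultdict(list)
--     for i, gen in enumerate(braid):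
--         positions[abs(gen)].append((i, gen > 0))
--
--     # For each generator that appears negatively, check if it's "surrounded"
--     # by positive generators that could conjugate it
--     for gen_idx, occurrences in positions.items():
--         negative_positions = [pos for pos, is_pos in occurrences if not is_pos]
--
--         if negative_positions:
--             # Heuristic: negative generators should be "surrounded" by positive ones
--             for neg_pos in negative_positions:
--                 # Check if there are positive generators nearby that could conjugate
--                 has_left_conjugator = False
--                 has_right_conjugator = False
--
--                 # Look for potential conjugating generators
--                 for pos, is_pos in occurrences:
--                     if is_pos and pos < neg_pos:
--                         has_left_conjugator = True
--                     if is_pos and pos > neg_pos: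
--                         has_right_conjugator = True
--
--                 if not (has_left_conjugator and has_right_conjugator):
--                     return False
--
--     return True
-- ===== SOURCE B (Python) =====
-- def is_quasipositive_braid(braid):
--     """One-pass re-implementation: precompute first/last positive-occurrence
--     index per generator, then each non-positive occurrence needs a positive
--     occurrence of the same generator strictly on both sides."""
--     if all(x >= 0 for x in braid):
--         return True
--     first = {}
--     last = {}
--     for i, g in enumerate(braid):
--         if g > 0:
--             if g not in first:
--                 first[g] = i
--             last[g] = i
--     for i, g in enumerate(braid):
--         if g <= 0:
--             a = abs(g)
--             if a not in first or not (first[a] < i < last[a]):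
--                 return False
--     return True
-- ===== Notes on version B (the rewrite author's own statement) =====
-- stated objective: faster
-- what changed: Replaces the grouped positions-dict with a per-negative-occurrence inner scan by a single pass recording each generator's first and last positive index, so every non-positive occurrence is checked in O(1).
import Mathlib
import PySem

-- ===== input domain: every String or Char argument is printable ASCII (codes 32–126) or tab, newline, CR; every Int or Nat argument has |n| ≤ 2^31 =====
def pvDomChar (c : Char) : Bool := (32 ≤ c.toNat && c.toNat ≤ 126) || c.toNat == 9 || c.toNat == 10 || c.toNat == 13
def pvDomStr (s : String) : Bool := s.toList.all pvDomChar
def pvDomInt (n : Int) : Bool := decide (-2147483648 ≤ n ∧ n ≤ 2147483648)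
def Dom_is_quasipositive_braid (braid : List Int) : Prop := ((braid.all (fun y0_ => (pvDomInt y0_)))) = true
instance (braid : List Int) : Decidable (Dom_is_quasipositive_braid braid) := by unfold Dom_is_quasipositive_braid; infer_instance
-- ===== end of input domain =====

-- B replaces A's per-generator occurrence lists with a per-negative-occurrence inner scan
-- by one pass recording each generator's first and last positive index (objective: faster).

-- ===== PORT A =====
-- is_positive_braid: loop returning False on x < 0
def pv_is_positive_braid (braid : List Int) : Bool :=
  braid.all (fun x => !(decide (x < 0)))

-- positions = defaultdict(list); for i, gen in enumerate(braid): positions[abs(gen)].append((i, gen > 0))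
def pvPositions (braid : List Int) : PySem.Dict Int (List (Int × Bool)) :=
  (PySem.List.enumerate braid).foldl
    (fun d p => d.modify (|p.2|) [] (· ++ [(p.1, decide (0 < p.2))])) PySem.Dict.empty

def is_quasipositive_braid (braid : List Int) : Bool :=
  if pv_is_positive_braid braid then true
  else
    let positions := pvPositions braid
    -- for gen_idx, occurrences in positions.items(): … (the early-return loops become `all`s)
    positions.items.all (fun kv =>
      let negative_positions := (kv.2.filter (fun pi => !pi.2)).map (·.1)
      negative_positions.all (fun neg_pos =>
        -- inner flag-setting loop over occurrences
        let st := kv.2.foldl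
          (fun (st : Bool × Bool) pi =>
            (st.1 || (pi.2 && decide (pi.1 < neg_pos)),
             st.2 || (pi.2 && decide (neg_pos < pi.1)))) (false, false)
        st.1 && st.2))

-- ===== PORT B =====
-- one pass building each generator's first/last positive-occurrence index
def pvFirstLast (braid : List Int) :
    PySem.Dict Int Int × PySem.Dict Int Int :=
  (PySem.List.enumerate braid).foldl
    (fun st p =>
      if 0 < p.2 then
        ((if st.1.contains p.2 then st.1 else st.1.insert p.2 p.1),
         st.2.insert p.2 p.1)
      else st)
    (PySem.Dict.empty, PySem.Dict.empty)

def is_quasipositive_braid_alt (braid : List Int) : Bool :=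
  if braid.all (fun x => decide (0 ≤ x)) then true
  else
    let fl := pvFirstLast braid
    (PySem.List.enumerate braid).all (fun p =>
      if p.2 ≤ 0 then
        match fl.1.get? (|p.2|), fl.2.get? (|p.2|) with
        | some f, some l => decide (f < p.1) && decide (p.1 < l)
        | _, _ => false
      else true)

-- ===== PRECONDITION & SPEC =====
def Spec_is_quasipositive_braid (braid : List Int) (out : Bool) : Prop := out = is_quasipositive_braid_alt braid
instance (braid : List Int) (out : Bool) : Decidable (Spec_is_quasipositive_braid braid out) := by unfold Spec_is_quasipositive_braid; infer_instance

-- ===== CLAIM (what is proved, stated in full; the proofs are below) =====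
def Claim_equal_is_quasipositive_braid : Prop := ∀ (braid : List Int), Dom_is_quasipositive_braid braid → Spec_is_quasipositive_braid braid (is_quasipositive_braid braid)

-- ===== LEMMAS AND PROOFS =====

-- A's positions dict maps a to the (index, sign) pairs of occurrences of |gen| = a, in order
lemma getD_pvPositions (braid : List Int) (a : Int) :
    (pvPositions braid).getD a [] =
      ((PySem.List.enumerate braid).filter (fun p => |p.2| == a)).map
        (fun p => (p.1, decide (0 < p.2))) := by
  unfold pvPositions
  rw [← List.foldl_map (f := fun (p : Int × Int) => ((|p.2| : Int), (p.1, decide (0 < p.2))))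
      (g := fun (d : PySem.Dict Int (List (Int × Bool))) q => d.modify q.1 [] (· ++ [q.2])),
    PySem.Dict.getD_foldl_modify_append]
  simp [List.filter_map]
  rfl

lemma keys_pvPositions (braid : List Int) :
    (pvPositions braid).keys =
      PySem.Set.ofList ((PySem.List.enumerate braid).map (fun p => |p.2|)) := by
  unfold pvPositions
  rw [PySem.Dict.keys_foldl_modify_key (key := fun (p : Int × Int) => (|p.2| : Int))
      (f := fun _ p l => l ++ [(p.1, decide (0 < p.2))])]
  simp [PySem.Set.update_nil_left]

lemma nodup_keys_pvPositions (braid : List Int) : (pvPositions braid).keys.Nodup := by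
  unfold pvPositions
  exact PySem.Dict.nodup_keys_foldl_modify_key _ (fun (p : Int × Int) => (|p.2| : Int)) _
      (fun _ p l => l ++ [(p.1, decide (0 < p.2))]) _ (by simp)

-- iterating a Nodup-keyed dict's items is iterating its keys with getD
lemma items_all_iff {ν : Type} (d : PySem.Dict Int ν) (h : d.keys.Nodup) (d0 : ν)
    (f : Int × ν → Bool) :
    d.items.all f = true ↔ ∀ k ∈ d.keys, f (k, d.getD k d0) = true := by
  simp only [List.all_eq_true]
  constructor
  · intro h' k hk
    simp only [PySem.Dict.keys, List.mem_map] at hk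
    obtain ⟨kv, hkv, rfl⟩ := hk
    rw [PySem.Dict.getD_of_mem_items d (by exact hkv) h d0]
    exact h' kv hkv
  · intro h' kv hkv
    have := h' kv.1 (PySem.Dict.mem_keys_of_mem_items d hkv)
    rwa [PySem.Dict.getD_of_mem_items d (by exact hkv) h d0] at this

lemma foldl_or_any {β : Type} (l : List β) (f : β → Bool) (b : Bool) :
    l.foldl (fun b x => b || f x) b = (b || l.any f) := by
  induction l generalizing b with
  | nil => simp
  | cons x t ih => simp [List.foldl_cons, ih, Bool.or_assoc]

-- B's loop body, named for the fold induction
def pvStep (st : PySem.Dict Int Int × PySem.Dict Int Int) (p : Int × Int) :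
    PySem.Dict Int Int × PySem.Dict Int Int :=
  if 0 < p.2 then
    ((if st.1.contains p.2 then st.1 else st.1.insert p.2 p.1), st.2.insert p.2 p.1)
  else st

-- the first/last dicts hold the head/last of the positive-occurrence index list of each key
lemma pvStep_get? (l : List (Int × Int)) (a : Int) :
    (l.foldl pvStep (PySem.Dict.empty, PySem.Dict.empty)).1.get? a
        = ((l.filter (fun p => decide (0 < p.2) && p.2 == a)).map (·.1)).head?
      ∧ (l.foldl pvStep (PySem.Dict.empty, PySem.Dict.empty)).2.get? a
        = ((l.filter (fun p => decide (0 < p.2) && p.2 == a)).map (·.1)).getLast? := by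
  induction l using List.reverseRecOn with
  | nil => simp [PySem.Dict.get?_empty]
  | append_singleton t x ih =>
    rw [List.foldl_append]
    obtain ⟨ih1, ih2⟩ := ih
    by_cases hx : 0 < x.2
    · simp only [List.foldl_cons, List.foldl_nil, pvStep, if_pos hx]
      by_cases ha : x.2 = a
      · subst ha
        have hfil : (t ++ [x]).filter (fun p => decide (0 < p.2) && p.2 == x.2)
            = t.filter (fun p => decide (0 < p.2) && p.2 == x.2) ++ [x] := by
          simp [List.filter_append, hx]
        constructor
        · by_cases hc : ((t.foldl pvStep (PySem.Dict.empty, PySem.Dict.empty)).1).contains x.2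
          · have hsome : ((t.filter (fun p => decide (0 < p.2) && p.2 == x.2)).map (·.1)).head?.isSome := by
              rw [← ih1, ← PySem.Dict.contains_eq_isSome_get?]; exact hc
            simp only [if_pos hc, ih1, hfil, List.map_append]
            cases hh : ((t.filter (fun p => decide (0 < p.2) && p.2 == x.2)).map (·.1)) with
            | nil => rw [hh] at hsome; simp at hsome
            | cons y ys => simp
          · have hnone : ((t.filter (fun p => decide (0 < p.2) && p.2 == x.2)).map (·.1)) = [] := by
              have : ((t.filter (fun p => decide (0 < p.2) && p.2 == x.2)).map (·.1)).head? = none := by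
                rw [← ih1]
                cases hg : ((t.foldl pvStep (PySem.Dict.empty, PySem.Dict.empty)).1).get? x.2 with
                | none => rfl
                | some v =>
                  rw [PySem.Dict.contains_eq_isSome_get?, hg] at hc; simp at hc
              exact List.head?_eq_none_iff.mp this
            simp [if_neg hc, hfil, hnone]
        · simp [hfil]
      · have hfil : (t ++ [x]).filter (fun p => decide (0 < p.2) && p.2 == a)
            = t.filter (fun p => decide (0 < p.2) && p.2 == a) := by
          simp [List.filter_append, ha]
        refine ⟨?_, ?_⟩
        · by_cases hc : ((t.foldl pvStep (PySem.Dict.empty, PySem.Dict.empty)).1).contains x.2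
          · simp [if_pos hc, ih1, hfil]
          · simp [if_neg hc, PySem.Dict.get?_insert, Ne.symm ha, ih1, hfil]
        · simp [PySem.Dict.get?_insert, Ne.symm ha, ih2, hfil]
    · have hfil : (t ++ [x]).filter (fun p => decide (0 < p.2) && p.2 == a)
          = t.filter (fun p => decide (0 < p.2) && p.2 == a) := by
        simp [List.filter_append, hx]
      simp only [List.foldl_cons, List.foldl_nil, pvStep, if_neg hx]
      exact ⟨by rw [ih1, hfil], by rw [ih2, hfil]⟩

-- on a strictly increasing list, "some member < i" is "the head is < i", and dually for getLast
lemma exists_lt_iff_head (l : List Int) (h : l.Pairwise (· < ·)) (i : Int) :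
    (∃ j ∈ l, j < i) ↔ (∃ h0, l.head? = some h0 ∧ h0 < i) := by
  cases l with
  | nil => simp
  | cons a t =>
    simp only [List.head?_cons, Option.some.injEq]
    constructor
    · rintro ⟨j, hj, hji⟩
      refine ⟨a, rfl, ?_⟩
      rcases List.mem_cons.mp hj with rfl | hjt
      · exact hji
      · exact lt_trans ((List.pairwise_cons.mp h).1 j hjt) hji
    · rintro ⟨h0, rfl, hlt⟩
      exact ⟨a, List.mem_cons_self, hlt⟩

lemma exists_gt_iff_getLast (l : List Int) (h : l.Pairwise (· < ·)) (i : Int) :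
    (∃ j ∈ l, i < j) ↔ (∃ h0, l.getLast? = some h0 ∧ i < h0) := by
  rw [← List.head?_reverse]
  have hrev : l.reverse.Pairwise (fun a b => b < a) := List.pairwise_reverse.mpr h
  constructor
  · rintro ⟨j, hj, hji⟩
    cases hl : l.reverse with
    | nil => simp [List.reverse_eq_nil_iff.mp hl] at hj
    | cons a t =>
      refine ⟨a, by simp, ?_⟩
      have hj' : j ∈ l.reverse := List.mem_reverse.mpr hj
      rw [hl] at hj' hrev
      rcases List.mem_cons.mp hj' with rfl | hjt
      · exact hji
      · exact lt_trans hji ((List.pairwise_cons.mp hrev).1 j hjt)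
  · rintro ⟨h0, hh, hlt⟩
    exact ⟨h0, List.mem_reverse.mp (List.mem_of_mem_head? hh), hlt⟩

-- enumerate indices are strictly increasing, through any filter
lemma pairwise_fst_filtered (braid : List Int) (c : Int × Int → Bool) :
    (((PySem.List.enumerate braid).filter c).map (·.1)).Pairwise (· < ·) := by
  have h1 : (PySem.List.enumerate braid).Pairwise (fun p q => p.1 < q.1) := by
    have h2 := PySem.List.pairwise_lt_pyRange_one 0 (0 + (braid.length : Int))
    rw [← PySem.List.map_fst_enumerate braid 0] at h2
    exact (List.pairwise_map).mp h2
  exact (List.pairwise_map).mpr (h1.filter c)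

-- the common meaning of both else-branches: every non-positive occurrence has a positive
-- occurrence of the same generator strictly on each side
def pvS (braid : List Int) : Prop :=
  ∀ p ∈ PySem.List.enumerate braid, p.2 ≤ 0 →
    ((∃ q ∈ PySem.List.enumerate braid, 0 < q.2 ∧ q.2 = |p.2| ∧ q.1 < p.1) ∧
     (∃ q ∈ PySem.List.enumerate braid, 0 < q.2 ∧ q.2 = |p.2| ∧ p.1 < q.1))

lemma pvFirstLast_eq (braid : List Int) :
    pvFirstLast braid = (PySem.List.enumerate braid).foldl pvStep (PySem.Dict.empty, PySem.Dict.empty) := rfl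

lemma B_else_iff (braid : List Int) :
    ((PySem.List.enumerate braid).all (fun p =>
      if p.2 ≤ 0 then
        match (pvFirstLast braid).1.get? (|p.2|), (pvFirstLast braid).2.get? (|p.2|) with
        | some f, some l => decide (f < p.1) && decide (p.1 < l)
        | _, _ => false
      else true) = true) ↔ pvS braid := by
  rw [List.all_eq_true]
  unfold pvS
  apply forall_congr'; intro p
  apply forall_congr'; intro hp
  by_cases hple : p.2 ≤ 0
  · simp only [if_pos hple, pvFirstLast_eq braid,
      (pvStep_get? (PySem.List.enumerate braid) (|p.2|)).1,
      (pvStep_get? (PySem.List.enumerate braid) (|p.2|)).2]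
    rw [show (p.2 ≤ 0 → ((∃ q ∈ PySem.List.enumerate braid, 0 < q.2 ∧ q.2 = |p.2| ∧ q.1 < p.1) ∧
     (∃ q ∈ PySem.List.enumerate braid, 0 < q.2 ∧ q.2 = |p.2| ∧ p.1 < q.1))) ↔
     ((∃ q ∈ PySem.List.enumerate braid, 0 < q.2 ∧ q.2 = |p.2| ∧ q.1 < p.1) ∧
     (∃ q ∈ PySem.List.enumerate braid, 0 < q.2 ∧ q.2 = |p.2| ∧ p.1 < q.1)) from
       ⟨fun h => h hple, fun h _ => h⟩]
    have hL := exists_lt_iff_head _ (pairwise_fst_filtered braid (fun q => decide (0 < q.2) && q.2 == (|p.2| : Int))) p.1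
    have hR := exists_gt_iff_getLast _ (pairwise_fst_filtered braid (fun q => decide (0 < q.2) && q.2 == (|p.2| : Int))) p.1
    rw [show (∃ q ∈ PySem.List.enumerate braid, 0 < q.2 ∧ q.2 = |p.2| ∧ q.1 < p.1) ↔
        (∃ j ∈ ((PySem.List.enumerate braid).filter (fun q => decide (0 < q.2) && q.2 == (|p.2| : Int))).map (·.1), j < p.1) by
      simp only [List.mem_map, List.mem_filter, Bool.and_eq_true, decide_eq_true_eq, beq_iff_eq]
      constructor
      · rintro ⟨q, hq, h1, h2, h3⟩; exact ⟨q.1, ⟨q, ⟨hq, h1, h2⟩, rfl⟩, h3⟩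
      · rintro ⟨j, ⟨q, ⟨hq, h1, h2⟩, rfl⟩, h3⟩; exact ⟨q, hq, h1, h2, h3⟩]
    rw [show (∃ q ∈ PySem.List.enumerate braid, 0 < q.2 ∧ q.2 = |p.2| ∧ p.1 < q.1) ↔
        (∃ j ∈ ((PySem.List.enumerate braid).filter (fun q => decide (0 < q.2) && q.2 == (|p.2| : Int))).map (·.1), p.1 < j) by
      simp only [List.mem_map, List.mem_filter, Bool.and_eq_true, decide_eq_true_eq, beq_iff_eq]
      constructor
      · rintro ⟨q, hq, h1, h2, h3⟩; exact ⟨q.1, ⟨q, ⟨hq, h1, h2⟩, rfl⟩, h3⟩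
      · rintro ⟨j, ⟨q, ⟨hq, h1, h2⟩, rfl⟩, h3⟩; exact ⟨q, hq, h1, h2, h3⟩]
    rw [hL, hR]
    cases hh : ((PySem.List.enumerate braid).filter (fun q => decide (0 < q.2) && q.2 == (|p.2| : Int))).map (·.1) |>.head? with
    | none =>
      cases hgl : ((PySem.List.enumerate braid).filter (fun q => decide (0 < q.2) && q.2 == (|p.2| : Int))).map (·.1) |>.getLast? with
      | none => simp
      | some l => simp
    | some f =>
      cases hgl : ((PySem.List.enumerate braid).filter (fun q => decide (0 < q.2) && q.2 == (|p.2| : Int))).map (·.1) |>.getLast? with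
      | none => simp
      | some l => simp
  · simp only [if_neg hple]
    simp [hple]

lemma inner_check (occ : List (Int × Bool)) (np : Int) :
    ((occ.foldl (fun (st : Bool × Bool) pi =>
        (st.1 || (pi.2 && decide (pi.1 < np)),
         st.2 || (pi.2 && decide (np < pi.1)))) (false, false)).1
      && (occ.foldl (fun (st : Bool × Bool) pi =>
        (st.1 || (pi.2 && decide (pi.1 < np)),
         st.2 || (pi.2 && decide (np < pi.1)))) (false, false)).2)
    = (occ.any (fun pi => pi.2 && decide (pi.1 < np))
        && occ.any (fun pi => pi.2 && decide (np < pi.1))) := by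
  rw [PySem.List.foldl_prod_mk (f := fun b (pi : Int × Bool) => b || (pi.2 && decide (pi.1 < np)))
      (g := fun b (pi : Int × Bool) => b || (pi.2 && decide (np < pi.1))), foldl_or_any, foldl_or_any]
  simp

lemma A_else_iff (braid : List Int) :
    ((pvPositions braid).items.all (fun kv =>
      let negative_positions := (kv.2.filter (fun pi => !pi.2)).map (·.1)
      negative_positions.all (fun neg_pos =>
        let st := kv.2.foldl
          (fun (st : Bool × Bool) pi =>
            (st.1 || (pi.2 && decide (pi.1 < neg_pos)),
             st.2 || (pi.2 && decide (neg_pos < pi.1)))) (false, false)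
        st.1 && st.2)) = true) ↔ pvS braid := by
  rw [items_all_iff _ (nodup_keys_pvPositions braid) [] _]
  simp only [getD_pvPositions, keys_pvPositions, inner_check, List.all_eq_true]
  simp only [List.mem_map, List.mem_filter, List.any_map, List.any_filter,
    PySem.Set.mem_ofList, Bool.and_eq_true, List.any_eq_true, decide_eq_true_eq,
    Bool.not_eq_true', beq_iff_eq, Function.comp_apply]
  unfold pvS
  constructor
  · intro h p hp hple
    obtain ⟨⟨q, hq, hqa, hqp, hql⟩, ⟨r, hr, hra, hrp, hrl⟩⟩ :=
      h (|p.2|) ⟨p, hp, rfl⟩ p.1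
        ⟨(p.1, decide (0 < p.2)), ⟨⟨p, ⟨hp, rfl⟩, rfl⟩, by simpa using not_lt.mpr hple⟩, rfl⟩
    exact ⟨⟨q, hq, hqp, by rw [← hqa, abs_of_pos hqp], hql⟩,
           ⟨r, hr, hrp, by rw [← hra, abs_of_pos hrp], hrl⟩⟩
  · rintro h k hk x ⟨a, ⟨⟨a1, ⟨ha1, ha1k⟩, rfl⟩, ha2⟩, rfl⟩
    have ha1le : a1.2 ≤ 0 := by simpa [not_lt] using ha2
    obtain ⟨⟨q, hq, hqp, hqa, hql⟩, ⟨r, hr, hrp, hra, hrl⟩⟩ := h a1 ha1 ha1le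
    exact ⟨⟨q, hq, by rw [abs_of_pos hqp, hqa, ha1k], hqp, hql⟩,
           ⟨r, hr, by rw [abs_of_pos hrp, hra, ha1k], hrp, hrl⟩⟩

theorem pv_main (braid : List Int) :
    is_quasipositive_braid braid = is_quasipositive_braid_alt braid := by
  have hx : ∀ x : Int, (!(decide (x < 0))) = decide (0 ≤ x) := by
    intro x; by_cases hx : x < 0
    · simp [hx]
    · simp [hx]
      omega
  unfold is_quasipositive_braid is_quasipositive_braid_alt pv_is_positive_braid
  simp only [hx]
  cases hall : (braid.all fun x => decide (0 ≤ x)) with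
  | true => simp
  | false =>
    simp only [Bool.false_eq_true, if_false]
    rw [Bool.eq_iff_iff, A_else_iff, B_else_iff]

-- ===== VERDICT (by name: the statement is the Claim_ definition above) =====
theorem is_quasipositive_braid_spec : Claim_equal_is_quasipositive_braid := by
  intro braid _
  unfold Spec_is_quasipositive_braid
  exact pv_main braid
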